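-- pv_equiv track=rewrite | github.com/glaulab/LASC | LASC_output_visualization.py | sliding_window_mode
-- ===== SOURCE A (Python) =====
-- from collections import Counter
--
-- def sliding_window_mode(seq, window_size):
--     windows = []
--     for i in range(len(seq) - window_size + 1):
--         window = seq[i:i+window_size]
--         window_counter = Counter(window)
--         window_mode = window_counter.most_common(1)[0][0]
--         windows.append(window_mode)
--     return windows
-- ===== SOURCE B (Python) =====
-- def sliding_window_mode(seq, window_size):
--     num = len(seq) - window_size + 1
--     if num <= 0:
--         return []
--     counts = {}
--     for x in seq[:window_size]:
--         counts[x] = counts.get(x, 0) + 1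
--     out = []
--     for i in range(num):
--         if i:
--             old = seq[i - 1]
--             counts[old] = counts[old] - 1
--             new = seq[i + window_size - 1]
--             counts[new] = counts.get(new, 0) + 1
--         best = seq[i]
--         best_count = counts[best]
--         for j in range(i + 1, i + window_size):
--             c = counts[seq[j]]
--             if c > best_count:
--                 best, best_count = seq[j], c
--         out.append(best)
--     return out
-- ===== Notes on version B (the rewrite author's own statement) =====
-- stated objective: alternative
-- what changed: B maintains one count dict incrementally across slides (decrement the element leaving, increment the one entering) and picks each window's mode by a single strict-improvement scan over the window, instead of A's per-window Counter construction plus most_common's stable sort over the counter items.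
-- outside the precondition, e.g. on sliding_window_mode([1, 2], 0): A raises IndexError, B raises KeyError; on sliding_window_mode([5], -1): A raises IndexError, B raises KeyError
import Mathlib
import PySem

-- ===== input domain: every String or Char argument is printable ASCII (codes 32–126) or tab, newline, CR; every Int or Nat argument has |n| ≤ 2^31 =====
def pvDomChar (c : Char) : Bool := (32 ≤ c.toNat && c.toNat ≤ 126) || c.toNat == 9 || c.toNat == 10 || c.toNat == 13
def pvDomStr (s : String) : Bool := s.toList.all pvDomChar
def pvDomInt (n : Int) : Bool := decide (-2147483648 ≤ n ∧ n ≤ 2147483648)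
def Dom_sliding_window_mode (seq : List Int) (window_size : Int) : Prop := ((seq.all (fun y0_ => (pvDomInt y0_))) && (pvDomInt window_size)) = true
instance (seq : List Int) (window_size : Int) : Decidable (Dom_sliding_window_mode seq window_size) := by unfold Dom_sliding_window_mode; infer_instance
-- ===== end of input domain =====

-- B replaces per-window Counter construction + most_common by an incrementally maintained count
-- dict and a running strict-max scan of the window (objective: alternative; same worst-case cost).

-- ===== PORT A =====
-- most_common(1)[0][0] = head of the stable reverse sort of the counter's items by count;
-- the [] branch of the match is where Python raises IndexError (empty window) — excluded by Pre_.
def sliding_window_mode (seq : List Int) (window_size : Int) : List Int :=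
  (PySem.List.pyRange 0 ((seq.length : Int) - window_size + 1) 1).foldl
    (fun windows i =>
      let window := PySem.List.slice seq (some i) (some (i + window_size))
      let window_counter := PySem.Dict.counter window
      match PySem.List.sorted window_counter.items (fun p => p.2) true with
      | [] => windows
      | p :: _ => windows ++ [p.1]) []

-- ===== PORT B =====
-- counts[old] -= 1 reads an existing key in Python; ported with getD (the key is present on every
-- input admitted by Pre_).
def sliding_window_mode_alt (seq : List Int) (window_size : Int) : List Int :=
  let num := (seq.length : Int) - window_size + 1
  if num ≤ 0 then []
  else
    let counts0 := (PySem.List.slice seq none (some window_size)).foldl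
        (fun d x => d.insert x (d.getD x 0 + 1)) PySem.Dict.empty
    ((PySem.List.pyRange 0 num 1).foldl
      (fun (st : List Int × PySem.Dict Int Int) i =>
        let counts :=
          if i ≠ 0 then
            let old := PySem.List.pyGetD seq (i - 1) 0
            let c1 := st.2.insert old (st.2.getD old 0 - 1)
            let nw := PySem.List.pyGetD seq (i + window_size - 1) 0
            c1.insert nw (c1.getD nw 0 + 1)
          else st.2
        let b0 := PySem.List.pyGetD seq i 0
        let best := (PySem.List.pyRange (i + 1) (i + window_size) 1).foldl
            (fun (b : Int × Int) j =>
              let x := PySem.List.pyGetD seq j 0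
              let c := counts.getD x 0
              if c > b.2 then (x, c) else b)
            (b0, counts.getD b0 0)
        (st.1 ++ [best.1], counts)) ([], counts0)).1

-- ===== PRECONDITION & SPEC =====
-- A raises IndexError on every window_size ≤ 0 (the window slice is empty, most_common(1)[0] fails).
def Pre_sliding_window_mode (seq : List Int) (window_size : Int) : Prop := 1 ≤ window_size
instance (seq : List Int) (window_size : Int) : Decidable (Pre_sliding_window_mode seq window_size) := by unfold Pre_sliding_window_mode; infer_instance
def pvWitness_sliding_window_mode : List Int × Int := ([1, 2, 2], 2)

def Spec_sliding_window_mode (seq : List Int) (window_size : Int) (out : List Int) : Prop := out = sliding_window_mode_alt seq window_size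
instance (seq : List Int) (window_size : Int) (out : List Int) : Decidable (Spec_sliding_window_mode seq window_size out) := by unfold Spec_sliding_window_mode; infer_instance

-- ===== CLAIM (what is proved, stated in full; the proofs are below) =====
def Claim_equal_sliding_window_mode : Prop := ∀ (seq : List Int) (window_size : Int), Dom_sliding_window_mode seq window_size → Pre_sliding_window_mode seq window_size → Spec_sliding_window_mode seq window_size (sliding_window_mode seq window_size)

-- ===== LEMMAS AND PROOFS =====

-- The common characterisation of both programs' per-window value: the first element of the
-- window whose count is maximal (Counter insertion order + stable reverse sort for A, the
-- strict-improvement scan for B).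
def pvWnd (seq : List Int) (wn k : Nat) : List Int := (seq.drop k).take wn

def pvIsMode (w : List Int) (x : Int) : Bool := w.all (fun y => decide ((w.count y : Int) ≤ (w.count x : Int)))

def pvModeW (w : List Int) : Int := (w.find? (pvIsMode w)).getD 0

-- strict-improvement fold: running argmax in which the first occurrence of the maximum wins
def pvSaf {α : Type} (c : α → Int) (b : α) (l : List α) : α :=
  l.foldl (fun b y => if c b < c y then y else b) b

theorem pvSaf_max {α : Type} (c : α → Int) (b : α) (l : List α) :
    ∀ y ∈ b :: l, c y ≤ c (pvSaf c b l) := by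
  induction l generalizing b with
  | nil => simp [pvSaf]
  | cons z t ih =>
    intro y hy
    have step : pvSaf c b (z :: t) = pvSaf c (if c b < c z then z else b) t := by
      simp [pvSaf]
    have hbd : c (if c b < c z then z else b) ≤ c (pvSaf c (if c b < c z then z else b) t) :=
      ih _ _ (by simp)
    have hb : c b ≤ c (if c b < c z then z else b) := by split_ifs with h; exact le_of_lt h; rfl
    have hz : c z ≤ c (if c b < c z then z else b) := by
      split_ifs with h
      · rfl
      · exact le_of_not_gt (by simpa using h)
    rw [step]
    simp only [List.mem_cons] at hy
    rcases hy with rfl | rfl | hy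
    · exact le_trans hb hbd
    · exact le_trans hz hbd
    · exact ih _ y (List.mem_cons_of_mem _ hy)

theorem pvSaf_append {α : Type} (c : α → Int) (b : α) (l : List α) (y : α) :
    pvSaf c b (l ++ [y]) = if c (pvSaf c b l) < c y then y else pvSaf c b l := by
  simp [pvSaf, List.foldl_append]

theorem pvFind?_congr {α : Type} (l : List α) (p q : α → Bool) (h : ∀ x ∈ l, p x = q x) :
    l.find? p = l.find? q := by
  induction l with
  | nil => rfl
  | cons x t ih =>
    rw [List.find?_cons, List.find?_cons, h x (by simp)]
    split
    · rfl
    · exact ih fun z hz => h z (by simp [hz])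

theorem pvSaf_mem {α : Type} (c : α → Int) (b : α) (l : List α) : pvSaf c b l ∈ b :: l := by
  induction l using List.reverseRecOn with
  | nil => simp [pvSaf]
  | append_singleton t y ih =>
    rw [pvSaf_append]
    split
    · simp
    · rcases (List.mem_cons).1 ih with h | h
      · simp [h]
      · simp [List.mem_cons, List.mem_append, h]

theorem pvSaf_find {α : Type} (c : α → Int) (b : α) (l : List α) :
    (b :: l).find? (fun y => (b :: l).all (fun z => decide (c z ≤ c y))) = some (pvSaf c b l) := by
  induction l using List.reverseRecOn with
  | nil => simp [pvSaf]
  | append_singleton t y ih =>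
    have hmax := pvSaf_max c b t
    rw [pvSaf_append]
    have hcons : b :: (t ++ [y]) = (b :: t) ++ [y] := by simp
    rw [hcons, List.find?_append]
    by_cases h : c (pvSaf c b t) < c y
    · have h1 : (b :: t).find? (fun z => ((b :: t) ++ [y]).all (fun w => decide (c w ≤ c z))) = none := by
        rw [List.find?_eq_none]
        intro x hx
        simp only [List.all_append, Bool.and_eq_true]
        intro hcontra
        have hyx : c y ≤ c x := by simpa using hcontra.2
        have := hmax x hx
        omega
      rw [h1]
      simp only [Option.none_or, if_pos h]
      have hy : (fun z => ((b :: t) ++ [y]).all (fun w => decide (c w ≤ c z))) y = true := by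
        simp only [List.all_append, Bool.and_eq_true]
        refine ⟨?_, by simp⟩
        rw [List.all_eq_true]
        intro x hx
        have := hmax x hx
        simp; omega
      exact List.find?_cons_of_pos (p := fun z => ((b :: t) ++ [y]).all (fun w => decide (c w ≤ c z))) hy
    · have h2 : (b :: t).find? (fun z => ((b :: t) ++ [y]).all (fun w => decide (c w ≤ c z)))
          = (b :: t).find? (fun z => (b :: t).all (fun w => decide (c w ≤ c z))) := by
        apply pvFind?_congr
        intro x hx
        by_cases hp : (b :: t).all (fun w => decide (c w ≤ c x)) = true
        · have hyx : c y ≤ c x := by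
            have hbx : c (pvSaf c b t) ≤ c x := by
              rw [List.all_eq_true] at hp
              simpa using hp (pvSaf c b t) (pvSaf_mem c b t)
            omega
          simp only [List.all_append, hp, Bool.true_and]
          simp only [List.all_eq_true] at hp ⊢
          intro w hw; simp at hw; simp [hw, hyx]
        · simp only [Bool.not_eq_true] at hp
          simp only [List.all_append, hp, Bool.false_and]
      rw [h2, ih]
      simp [Option.some_or, if_neg h]

theorem pvFind?_foldl_add (p : Int → Bool) (l : List Int) :
    ∀ acc : List Int, ((l.foldl PySem.Set.add acc).find? p) = ((acc.find? p).or (l.find? p)) := by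
  induction l with
  | nil => simp
  | cons x t ih =>
    intro acc
    simp only [List.foldl_cons]
    rw [ih (PySem.Set.add acc x)]
    rw [PySem.Set.add_eq_ite]
    by_cases hx : x ∈ acc
    · rw [if_pos hx, List.find?_cons]
      cases hpx : p x with
      | true =>
        have : (acc.find? p).isSome := List.find?_isSome.2 ⟨x, hx, hpx⟩
        obtain ⟨v, hv⟩ := Option.isSome_iff_exists.1 this
        simp [hv]
      | false => rfl
    · rw [if_neg hx, List.find?_append, List.find?_cons]
      cases hpx : p x with
      | true => simp [List.find?, hpx]
      | false => simp [List.find?, hpx]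

theorem pvFind?_ofList (p : Int → Bool) (l : List Int) :
    (PySem.Set.ofList l).find? p = l.find? p := by
  rw [PySem.Set.ofList_eq_foldl, pvFind?_foldl_add]
  simp

theorem pvFoldl_ins_head {α : Type} (key : α → Int) (l : List α) :
    ∀ (h : α) (r : List α), ∃ r',
      l.foldl (fun acc x => PySem.List.insertBy (fun a b => decide (key b < key a)) x acc) (h :: r)
        = (pvSaf key h l) :: r' := by
  induction l with
  | nil => intro h r; exact ⟨r, rfl⟩
  | cons y t ih =>
    intro h r
    simp only [List.foldl_cons]
    have hins : PySem.List.insertBy (fun a b => decide (key b < key a)) y (h :: r)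
        = if key h < key y then y :: h :: r else h :: PySem.List.insertBy (fun a b => decide (key b < key a)) y r := by
      simp [PySem.List.insertBy]
    rw [hins]
    by_cases hc : key h < key y
    · rw [if_pos hc]
      obtain ⟨r', hr'⟩ := ih y (h :: r)
      exact ⟨r', by rw [hr']; simp [pvSaf, hc]⟩
    · rw [if_neg hc]
      obtain ⟨r', hr'⟩ := ih h _
      exact ⟨r', by rw [hr']; simp [pvSaf, hc]⟩

theorem pvAll_ofList (q : Int → Bool) (l : List Int) :
    (PySem.Set.ofList l).all q = l.all q := by
  rw [Bool.eq_iff_iff, List.all_eq_true, List.all_eq_true]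
  constructor <;> intro h x hx
  · exact h x (by simpa [PySem.Set.mem_ofList] using hx)
  · exact h x (by simpa [PySem.Set.mem_ofList] using hx)

theorem pvTD (seq : List Int) (a m : Nat) (h : a + m ≤ seq.length) :
    (seq.drop a).take m = (List.range m).map (fun t => seq.getD (a + t) 0) := by
  apply List.ext_getElem
  · simp; omega
  · intro i h1 h2
    simp only [List.getElem_take, List.getElem_drop, List.getElem_map, List.getElem_range]
    rw [List.getD_eq_getElem _ _ (by simp at h1 ⊢; omega)]

theorem pvPairfold (c : Int → Int) (l : List Int) (b : Int) :
    l.foldl (fun (p : Int × Int) k => if p.2 < c k then (k, c k) else p) (b, c b)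
      = (pvSaf c b l, c (pvSaf c b l)) := by
  induction l generalizing b with
  | nil => rfl
  | cons z t ih =>
    simp only [List.foldl_cons, pvSaf]
    by_cases h : c b < c z <;> simp [h, ih, pvSaf]

theorem pvModeW_eq_saf (w0 : Int) (wt : List Int) :
    pvModeW (w0 :: wt) = pvSaf (fun x => ((w0 :: wt).count x : Int)) w0 wt := by
  unfold pvModeW pvIsMode
  rw [pvSaf_find (fun x => ((w0 :: wt).count x : Int)) w0 wt]
  rfl

theorem pvWnd_cons (seq : List Int) (wn k : Nat) (hw : 1 ≤ wn) (hk : k + wn ≤ seq.length) :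
    pvWnd seq wn k = seq.getD k 0 :: (seq.drop (k + 1)).take (wn - 1) := by
  unfold pvWnd
  have hklt : k < seq.length := by omega
  obtain ⟨m, rfl⟩ : ∃ m, wn = m + 1 := ⟨wn - 1, by omega⟩
  rw [List.drop_eq_getElem_cons hklt, List.take_succ_cons, List.getD_eq_getElem _ _ hklt]
  simp

theorem pvWnd_snoc (seq : List Int) (wn k : Nat) (hw : 1 ≤ wn) (hk : k + 1 + wn ≤ seq.length) :
    pvWnd seq wn (k + 1) = (seq.drop (k + 1)).take (wn - 1) ++ [seq.getD (k + wn) 0] := by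
  unfold pvWnd
  obtain ⟨m, rfl⟩ : ∃ m, wn = m + 1 := ⟨wn - 1, by omega⟩
  rw [List.take_add_one]
  have hm : m < (seq.drop (k + 1)).length := by simp; omega
  simp only [List.getElem?_eq_getElem hm, List.getElem_drop, Option.toList_some]
  rw [← List.getD_eq_getElem seq 0 (by omega : k + 1 + m < seq.length)]
  simp only [Nat.add_sub_cancel]
  rw [show k + 1 + m = k + (m + 1) from by omega]

def pvInv (seq : List Int) (wn : Nat) (d : PySem.Dict Int Int) (k : Nat) : Prop :=
  ∀ x : Int, d.getD x 0 = (List.count x (pvWnd seq wn k) : Int)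

theorem pvInv_update (seq : List Int) (wn : Nat) (d : PySem.Dict Int Int) (k : Nat)
    (hw : 1 ≤ wn) (hk : k + 1 + wn ≤ seq.length) (hinv : pvInv seq wn d k) :
    pvInv seq wn
      ((d.insert (seq.getD k 0) (d.getD (seq.getD k 0) 0 - 1)).insert (seq.getD (k + wn) 0)
        (((d.insert (seq.getD k 0) (d.getD (seq.getD k 0) 0 - 1)).getD (seq.getD (k + wn) 0) 0) + 1))
      (k + 1) := by
  intro x
  have hcount :
      (List.count x (pvWnd seq wn (k + 1)) : Int)
        = (List.count x (pvWnd seq wn k) : Int)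
          - (if seq.getD k 0 = x then 1 else 0) + (if seq.getD (k + wn) 0 = x then 1 else 0) := by
    rw [pvWnd_snoc seq wn k hw hk, pvWnd_cons seq wn k hw (by omega)]
    rw [List.count_append, List.count_cons, List.count_cons, List.count_nil]
    simp only [beq_iff_eq]
    split_ifs <;> push_cast <;> omega
  rw [hcount, PySem.Dict.getD_insert, PySem.Dict.getD_insert, PySem.Dict.getD_insert]
  have ho := hinv (seq.getD k 0)
  have hn := hinv (seq.getD (k + wn) 0)
  have hx := hinv x
  split_ifs <;> subst_vars <;> first | omega | (rename_i h _ _; rw [h]; omega)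

theorem pvBscan (seq : List Int) (window_size : Int) (wn k : Nat) (d : PySem.Dict Int Int)
    (hws : window_size = (wn : Int)) (hw : 1 ≤ wn) (hk : k + wn ≤ seq.length)
    (hinv : pvInv seq wn d k) :
    ((PySem.List.pyRange ((k : Int) + 1) ((k : Int) + window_size) 1).foldl
        (fun (b : Int × Int) j =>
          let x := PySem.List.pyGetD seq j 0
          let c := d.getD x 0
          if c > b.2 then (x, c) else b)
        (PySem.List.pyGetD seq (k : Int) 0, d.getD (PySem.List.pyGetD seq (k : Int) 0) 0)).1
      = pvModeW (pvWnd seq wn k) := by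
  subst hws
  -- the scanned indices are k+1 .. k+wn-1; their elements are the tail of the window
  have hrange : PySem.List.pyRange ((k : Int) + 1) ((k : Int) + (wn : Int)) 1
      = (List.range (wn - 1)).map (fun t => ((k + 1 + t : Nat) : Int)) := by
    rw [PySem.List.pyRange_one]
    have : ((k : Int) + (wn : Int) - ((k : Int) + 1)).toNat = wn - 1 := by omega
    rw [this]
    apply List.map_congr_left
    intro t ht
    push_cast
    ring
  have hget : PySem.List.pyGetD seq ((k : Int)) 0 = seq.getD k 0 := PySem.List.pyGetD_natCast seq k 0
  rw [hrange, List.foldl_map, hget]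
  have hwt : pvWnd seq wn k = seq.getD k 0 :: (List.range (wn - 1)).map (fun t => seq.getD (k + 1 + t) 0) := by
    rw [pvWnd_cons seq wn k hw hk, pvTD seq (k + 1) (wn - 1) (by omega)]
  rw [hwt, pvModeW_eq_saf]
  set c : Int → Int := fun x => ((seq.getD k 0 :: (List.range (wn - 1)).map (fun t => seq.getD (k + 1 + t) 0)).count x : Int) with hc
  have hstep : ∀ (p : Int × Int) (t : Nat), t ∈ List.range (wn - 1) →
      (fun (b : Int × Int) j =>
          let x := PySem.List.pyGetD seq j 0
          let cc := d.getD x 0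
          if cc > b.2 then (x, cc) else b) p ((k + 1 + t : Nat) : Int)
        = (fun (p : Int × Int) x => if p.2 < c x then (x, c x) else p) p (seq.getD (k + 1 + t) 0) := by
    intro p t ht
    simp only [PySem.List.pyGetD_natCast]
    rw [hinv (seq.getD (k + 1 + t) 0), hwt]
  rw [PySem.List.foldl_congr_mem _ _ _ _ hstep]
  rw [hinv (seq.getD k 0), hwt]
  have hfuse := (List.foldl_map (f := fun t => seq.getD (k + 1 + t) 0)
      (g := fun (p : Int × Int) x => if p.2 < c x then (x, c x) else p)
      (l := List.range (wn - 1)) (init := (seq.getD k 0, c (seq.getD k 0)))).symm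
  rw [hfuse]
  exact congrArg Prod.fst
    (pvPairfold c ((List.range (wn - 1)).map (fun t => seq.getD (k + 1 + t) 0)) (seq.getD k 0))

theorem pvAwnd (w : List Int) (hw : w ≠ []) :
    ∃ (p : Int × Int) (t : List (Int × Int)),
      PySem.List.sorted (PySem.Dict.counter w).items (fun p => p.2) true = p :: t
        ∧ p.1 = pvModeW w := by
  set c : Int → Int := fun x => ((w.count x : Int)) with hc
  have hitems : (PySem.Dict.counter w).items = (PySem.Set.ofList w).map (fun k => (k, c k)) :=
    PySem.Dict.items_counter w
  obtain ⟨x, hx⟩ := List.exists_mem_of_ne_nil w hw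
  have hne : PySem.Set.ofList w ≠ [] := by
    intro h
    have := (PySem.Set.mem_ofList (y := x) (xs := w)).2 hx
    rw [h] at this
    exact absurd this (List.not_mem_nil)
  obtain ⟨k0, ks, hof⟩ := List.exists_cons_of_ne_nil hne
  rw [hitems, hof]
  rw [PySem.List.sorted_rev_eq_foldl_insertBy]
  simp only [List.map_cons, List.foldl_cons]
  have hins0 : PySem.List.insertBy (fun a b => decide ((b : Int × Int).2 < (a : Int × Int).2)) (k0, c k0) []
      = [(k0, c k0)] := by simp [PySem.List.insertBy]
  rw [hins0]
  obtain ⟨r', hr'⟩ := pvFoldl_ins_head (fun p : Int × Int => p.2) (ks.map (fun k => (k, c k))) (k0, c k0) []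
  rw [hr']
  refine ⟨_, r', rfl, ?_⟩
  -- the head is the paired strict-argmax over ks
  have hfuse := (List.foldl_map (f := fun k => (k, c k))
      (g := fun (p : Int × Int) q => if p.2 < q.2 then q else p)
      (l := ks) (init := ((k0, c k0) : Int × Int)))
  have hsaf : pvSaf (fun p : Int × Int => p.2) (k0, c k0) (ks.map (fun k => (k, c k)))
      = (pvSaf c k0 ks, c (pvSaf c k0 ks)) := by
    unfold pvSaf
    rw [hfuse]
    have := pvPairfold c ks k0
    unfold pvSaf at this
    simpa using this
  rw [hsaf]
  -- identify with the mode of w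
  have hfind := pvSaf_find c k0 ks
  have hcongr : (k0 :: ks).find? (fun y => (k0 :: ks).all (fun z => decide (c z ≤ c y)))
      = (k0 :: ks).find? (pvIsMode w) := by
    apply pvFind?_congr
    intro y _
    rw [← hof]
    unfold pvIsMode
    rw [pvAll_ofList]
  have : w.find? (pvIsMode w) = some (pvSaf c k0 ks) := by
    rw [← pvFind?_ofList, hof, ← hcongr, hfind]
  unfold pvModeW
  rw [this]
  rfl

theorem pvBloop (seq : List Int) (window_size : Int) (wn : Nat)
    (hws : window_size = (wn : Int)) (hw : 1 ≤ wn) :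
    ∀ (t k : Nat) (d : PySem.Dict Int Int) (acc : List Int),
      k + t + wn ≤ seq.length + 1 → pvInv seq wn d (k - 1) →
      ((PySem.List.pyRange (k : Int) ((k + t : Nat) : Int) 1).foldl
        (fun (st : List Int × PySem.Dict Int Int) i =>
          let counts :=
            if i ≠ 0 then
              let old := PySem.List.pyGetD seq (i - 1) 0
              let c1 := st.2.insert old (st.2.getD old 0 - 1)
              let nw := PySem.List.pyGetD seq (i + window_size - 1) 0
              c1.insert nw (c1.getD nw 0 + 1)
            else st.2
          let b0 := PySem.List.pyGetD seq i 0
          let best := (PySem.List.pyRange (i + 1) (i + window_size) 1).foldl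
              (fun (b : Int × Int) j =>
                let x := PySem.List.pyGetD seq j 0
                let c := counts.getD x 0
                if c > b.2 then (x, c) else b)
              (b0, counts.getD b0 0)
          (st.1 ++ [best.1], counts)) (acc, d)).1
        = acc ++ (List.range t).map (fun j => pvModeW (pvWnd seq wn (k + j))) := by
  intro t
  induction t with
  | zero =>
    intro k d acc hb hinv
    rw [PySem.List.pyRange_one_eq_nil (by simp)]
    simp
  | succ t ih =>
    intro k d acc hb hinv
    have hcons : PySem.List.pyRange (k : Int) ((k + (t + 1) : Nat) : Int) 1
        = (k : Int) :: PySem.List.pyRange ((k : Int) + 1) ((k + (t + 1) : Nat) : Int) 1 := by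
      apply PySem.List.pyRange_one_cons
      push_cast; omega
    rw [hcons, List.foldl_cons]
    by_cases hk0 : k = 0
    · -- first iteration of the whole loop: no count update
      subst hk0
      rw [if_neg (by simp)]
      have hscan := pvBscan seq window_size wn 0 d hws hw (by omega) (by simpa using hinv)
      simp only [Nat.cast_zero] at hscan
      simp only [Nat.cast_zero]
      rw [hscan]
      have ecast : ((0 + (t + 1) : Nat) : Int) = (((0 + 1) + t : Nat) : Int) := by push_cast; omega
      rw [show (0 : Int) + 1 = (((0 + 1) : Nat) : Int) from by norm_num, ecast]
      rw [ih (0 + 1) d (acc ++ [pvModeW (pvWnd seq wn 0)]) (by omega)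
        (by simpa using hinv)]
      rw [List.range_succ_eq_map, List.map_cons, List.map_map]
      simp only [Nat.add_zero, Nat.zero_add, List.append_assoc, List.singleton_append]
      have hfun : (fun j => pvModeW (pvWnd seq wn (1 + j))) = ((fun j => pvModeW (pvWnd seq wn j)) ∘ Nat.succ) := by
        funext j
        simp [Function.comp, Nat.add_comm]
      rw [hfun]
    · -- i = k ≥ 1: slide the counts from window k-1 to window k
      have hne : ((k : Int) ≠ 0) := by
        simp only [ne_eq, Nat.cast_eq_zero]; omega
      simp only [if_pos hne]
      have e1 : (k : Int) - 1 = ((k - 1 : Nat) : Int) := by push_cast; omega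
      have e2 : (k : Int) + window_size - 1 = ((k - 1 + wn : Nat) : Int) := by
        rw [hws]; push_cast; omega
      rw [e1, e2, PySem.List.pyGetD_natCast, PySem.List.pyGetD_natCast]
      have hupd : pvInv seq wn
          ((d.insert (seq.getD (k - 1) 0) (d.getD (seq.getD (k - 1) 0) 0 - 1)).insert
            (seq.getD (k - 1 + wn) 0)
            (((d.insert (seq.getD (k - 1) 0) (d.getD (seq.getD (k - 1) 0) 0 - 1)).getD
              (seq.getD (k - 1 + wn) 0) 0) + 1)) k := by
        have := pvInv_update seq wn d (k - 1) hw (by omega) hinv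
        have ek : k - 1 + 1 = k := by omega
        rwa [ek] at this
      set counts := ((d.insert (seq.getD (k - 1) 0) (d.getD (seq.getD (k - 1) 0) 0 - 1)).insert
            (seq.getD (k - 1 + wn) 0)
            (((d.insert (seq.getD (k - 1) 0) (d.getD (seq.getD (k - 1) 0) 0 - 1)).getD
              (seq.getD (k - 1 + wn) 0) 0) + 1)) with hcounts
      have hscan := pvBscan seq window_size wn k counts hws hw (by omega) hupd
      rw [hscan]
      have e3 : (k : Int) + 1 = (((k + 1) : Nat) : Int) := by push_cast; ring_nf
      have ecast : ((k + (t + 1) : Nat) : Int) = (((k + 1) + t : Nat) : Int) := by push_cast; omega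
      rw [e3, ecast]
      rw [ih (k + 1) counts (acc ++ [pvModeW (pvWnd seq wn k)]) (by omega)
        (by simpa using hupd)]
      rw [List.range_succ_eq_map, List.map_cons, List.map_map]
      simp only [Nat.add_zero, List.append_assoc, List.singleton_append]
      congr 2
      apply List.map_congr_left
      intro j _
      simp only [Function.comp_apply]
      rw [show k + 1 + j = k + (j + 1) from by omega]

theorem pvMain : ∀ (seq : List Int) (window_size : Int), 1 ≤ window_size →
    sliding_window_mode seq window_size = sliding_window_mode_alt seq window_size := by
  intro seq window_size hpre
  set n : Nat := seq.length with hn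
  set num : Int := (n : Int) - window_size + 1 with hnum
  by_cases hle : num ≤ 0
  · -- no windows on either side
    unfold sliding_window_mode sliding_window_mode_alt
    rw [PySem.List.pyRange_one_eq_nil (by omega)]
    simp only [List.foldl_nil]
    rw [if_pos (by exact hle)]
  · have hnum1 : 1 ≤ num := by omega
    set wn : Nat := window_size.toNat with hwn
    have hws : window_size = (wn : Int) := by omega
    have hw1 : 1 ≤ wn := by omega
    have hwle : wn ≤ n := by omega
    set numn : Nat := n - wn + 1 with hnumn
    have hnumc : num = (numn : Int) := by omega
    -- B side
    simp only [sliding_window_mode_alt]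
    rw [if_neg (by omega)]
    have hslice : PySem.List.slice seq none (some window_size) = pvWnd seq wn 0 := by
      rw [hws, PySem.List.slice_to seq (by omega)]
      unfold pvWnd
      simp
    have hinv0 : pvInv seq wn ((PySem.List.slice seq none (some window_size)).foldl
        (fun d x => d.insert x (d.getD x 0 + 1)) PySem.Dict.empty) 0 := by
      intro x
      rw [hslice, PySem.Dict.getD_foldl_insert_add_one, PySem.Dict.getD_empty]
      simp
    set counts0 : PySem.Dict Int Int := (PySem.List.slice seq none (some window_size)).foldl
        (fun d x => d.insert x (d.getD x 0 + 1)) PySem.Dict.empty with hc0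
    -- B = the list of window modes, by the loop invariant
    have hbl := pvBloop seq window_size wn hws hw1 numn 0 counts0 [] (by omega) (by simpa using hinv0)
    have er : PySem.List.pyRange 0 num 1 = PySem.List.pyRange ((0 : Nat) : Int) (((0 + numn : Nat)) : Int) 1 := by
      norm_num [hnumc]
    rw [er, hbl]
    -- A = the same list of window modes
    unfold sliding_window_mode
    have hstep : ∀ (windows : List Int), ∀ i ∈ PySem.List.pyRange 0 ((seq.length : Int) - window_size + 1) 1,
        (fun windows i =>
          match PySem.List.sorted (PySem.Dict.counter (PySem.List.slice seq (some i) (some (i + window_size)))).items (fun p => p.2) true with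
          | [] => windows
          | p :: _ => windows ++ [p.1]) windows i
        = windows ++ [pvModeW (pvWnd seq wn i.toNat)] := by
      intro windows i hi
      rw [PySem.List.mem_pyRange_one] at hi
      obtain ⟨hi0, hilt⟩ := hi
      set ki := i.toNat with hki
      have hie : i = (ki : Int) := by omega
      have hkb : ki + wn ≤ n := by omega
      have hwin : PySem.List.slice seq (some i) (some (i + window_size)) = pvWnd seq wn ki := by
        rw [hie, hws, show ((ki : Int) + (wn : Int)) = ((ki + wn : Nat) : Int) from by push_cast; ring,
          PySem.List.slice_natCast]
        unfold pvWnd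
        congr 1
        omega
      have hnonnil : pvWnd seq wn ki ≠ [] := by
        unfold pvWnd
        intro hnil
        have := congrArg List.length hnil
        simp at this
        omega
      obtain ⟨p, t, hsort, hp1⟩ := pvAwnd (pvWnd seq wn ki) hnonnil
      simp only [hwin, hsort]
      rw [hp1]
    rw [PySem.List.foldl_congr_mem _ _ _ _ hstep]
    rw [show List.foldl (fun acc x => acc ++ [pvModeW (pvWnd seq wn x.toNat)]) []
          (PySem.List.pyRange 0 ((seq.length : Int) - window_size + 1) 1)
        = [] ++ (PySem.List.pyRange 0 ((seq.length : Int) - window_size + 1) 1).map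
            (fun x => pvModeW (pvWnd seq wn x.toNat))
      from PySem.List.foldl_append_singleton_eq_map _ _ _]
    rw [PySem.List.pyRange_one, List.map_map]
    rw [show (((seq.length : Int) - window_size + 1) - 0).toNat = numn from by omega]
    apply List.map_congr_left
    intro j _
    simp only [Function.comp_apply]
    rw [show ((0 : Int) + (j : Nat)).toNat = 0 + j from by omega]


-- ===== VERDICT (by name: the statement is the Claim_ definition above) =====
theorem sliding_window_mode_spec : Claim_equal_sliding_window_mode := by
  intro seq window_size _ hpre
  exact pvMain seq window_size hpre
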